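-- pv_equiv track=rewrite | github.com/jssong1592/python_practices | algorithm_practices/implementation/baek_1107.py | has_num
-- ===== SOURCE A (Python) =====
-- def has_num(dest,num_list):
--     for num in num_list:
--         temp = dest
--         if temp == 0:
--             if temp in num_list:
--                 return True
--         while temp > 0:
--             if num == temp % 10:
--                 return True
--             temp //= 10
--     return False
-- ===== SOURCE B (Python) =====
-- def has_num(dest, num_list):
--     # Phase 1: collect the decimal digits of dest once.
--     if dest == 0:
--         digits = [0]
--     else:
--         digits = []
--         temp = dest
--         while temp > 0:
--             digits.append(temp % 10)
--             temp //= 10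
--     # Phase 2: one membership pass.
--     return any(d in num_list for d in digits)
-- ===== Notes on version B (the rewrite author's own statement) =====
-- stated objective: faster
-- what changed: B computes the digit list of dest once and then makes a single any-membership pass, instead of A's loop over num_list that re-extracts dest's digits for every element.
import Mathlib
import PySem

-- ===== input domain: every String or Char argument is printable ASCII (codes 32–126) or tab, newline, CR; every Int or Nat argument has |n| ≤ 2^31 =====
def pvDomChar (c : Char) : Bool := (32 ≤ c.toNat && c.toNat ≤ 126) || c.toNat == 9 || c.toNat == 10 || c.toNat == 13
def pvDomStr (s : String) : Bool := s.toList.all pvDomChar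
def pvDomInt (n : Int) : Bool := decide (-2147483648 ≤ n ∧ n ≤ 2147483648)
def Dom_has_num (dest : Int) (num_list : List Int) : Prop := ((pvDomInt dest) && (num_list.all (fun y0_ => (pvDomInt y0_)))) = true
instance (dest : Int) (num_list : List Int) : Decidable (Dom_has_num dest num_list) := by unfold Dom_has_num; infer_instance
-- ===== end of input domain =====

-- B builds dest's digit list once and does one membership pass, replacing A's nested re-extraction per list element; return-value equivalence proved on all inputs.


-- ===== PORT A =====
-- while temp > 0: if num == temp % 10: return True; temp //= 10
def hasNumInner (num : Int) (temp : Int) : Bool :=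
  if 0 < temp then
    if num == PySem.Int.mod temp 10 then true
    else hasNumInner num (PySem.Int.floordiv temp 10)
  else false
termination_by temp.toNat
decreasing_by
  rename_i h _
  rw [PySem.Int.floordiv_eq_ediv_of_pos (by omega)]
  omega

-- for num in num_list: … (num_list stays the full list for the 'temp in num_list' test)
def hasNumLoop (dest : Int) (num_list : List Int) : List Int → Bool
  | [] => false
  | num :: rest =>
    if dest == 0 && num_list.contains dest then true
    else if hasNumInner num dest then true
    else hasNumLoop dest num_list rest

def has_num (dest : Int) (num_list : List Int) : Bool :=
  hasNumLoop dest num_list num_list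

-- ===== PORT B =====
-- Phase 1 loop: digits.append(temp % 10); temp //= 10
def digitsAcc (temp : Int) (digits : List Int) : List Int :=
  if 0 < temp then digitsAcc (PySem.Int.floordiv temp 10) (digits ++ [PySem.Int.mod temp 10])
  else digits
termination_by temp.toNat
decreasing_by
  rename_i h
  rw [PySem.Int.floordiv_eq_ediv_of_pos (by omega)]
  omega

def has_num_alt (dest : Int) (num_list : List Int) : Bool :=
  let digits : List Int := if dest == 0 then [0] else digitsAcc dest []
  digits.any (fun d => num_list.contains d)

-- ===== PRECONDITION & SPEC =====
def Spec_has_num (dest : Int) (num_list : List Int) (out : Bool) : Prop := out = has_num_alt dest num_list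
instance (dest : Int) (num_list : List Int) (out : Bool) : Decidable (Spec_has_num dest num_list out) := by unfold Spec_has_num; infer_instance

-- ===== CLAIM (what is proved, stated in full; the proofs are below) =====
def Claim_equal_has_num : Prop := ∀ (dest : Int) (num_list : List Int), Dom_has_num dest num_list → Spec_has_num dest num_list (has_num dest num_list)

-- ===== LEMMAS AND PROOFS =====

-- proof-side digit list of a positive number (low digit first)
def dlist (temp : Int) : List Int :=
  if 0 < temp then PySem.Int.mod temp 10 :: dlist (PySem.Int.floordiv temp 10)
  else []
termination_by temp.toNat
decreasing_by
  rename_i h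
  rw [PySem.Int.floordiv_eq_ediv_of_pos (by omega)]
  omega

theorem digitsAcc_eq (temp : Int) (acc : List Int) : digitsAcc temp acc = acc ++ dlist temp := by
  induction temp, acc using digitsAcc.induct with
  | case1 temp acc h ih =>
      rw [digitsAcc, dlist, if_pos h, if_pos h, ih]
      simp
  | case2 temp acc h =>
      rw [digitsAcc, dlist, if_neg h, if_neg h]
      simp

theorem inner_eq_contains (num temp : Int) : hasNumInner num temp = (dlist temp).contains num := by
  induction temp using dlist.induct with
  | case1 temp h ih =>
      rw [hasNumInner, dlist, if_pos h, if_pos h, List.contains_cons, ih]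
      cases hnum : (num == PySem.Int.mod temp 10) <;> simp
  | case2 temp h =>
      rw [hasNumInner, dlist, if_neg h, if_neg h]
      simp

theorem any_comm (l d : List Int) :
    l.any (fun a => d.contains a) = d.any (fun a => l.contains a) := by
  rw [Bool.eq_iff_iff]
  simp only [List.any_eq_true, List.contains_iff_mem]
  exact ⟨fun ⟨a, h1, h2⟩ => ⟨a, h2, h1⟩, fun ⟨a, h1, h2⟩ => ⟨a, h2, h1⟩⟩

theorem loop_zero (l suf : List Int) :
    hasNumLoop 0 l suf = (!suf.isEmpty && l.contains 0) := by
  induction suf with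
  | nil => simp [hasNumLoop]
  | cons num rest ih =>
      rw [hasNumLoop]
      by_cases hc : l.contains (0:Int) = true
      · have hif : ((0:Int) == 0 && l.contains (0:Int)) = true := by rw [hc]; rfl
        rw [hif, if_pos rfl, hc]
        simp
      · simp only [Bool.not_eq_true] at hc
        have hm0 : (0:Int) ∉ l := by simpa using hc
        have hif : ((0:Int) == 0 && l.contains (0:Int)) = false := by rw [hc]; rfl
        rw [hif]
        simp [ih, inner_eq_contains, dlist, hm0]

theorem loop_ne_zero (dest : Int) (hd : dest ≠ 0) (l suf : List Int) :
    hasNumLoop dest l suf = suf.any (fun num => hasNumInner num dest) := by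
  induction suf with
  | nil => simp [hasNumLoop]
  | cons num rest ih =>
      rw [hasNumLoop]
      have : (dest == 0) = false := by simpa using hd
      by_cases hi : hasNumInner num dest = true
      · simp [this, hi]
      · simp only [Bool.not_eq_true] at hi
        simp [this, hi, ih]

-- ===== VERDICT (by name: the statement is the Claim_ definition above) =====
theorem has_num_spec : Claim_equal_has_num := by
  intro dest num_list _
  unfold Spec_has_num has_num has_num_alt
  by_cases hd : dest = 0
  · subst hd
    rw [loop_zero]
    simp only [beq_self_eq_true, if_pos]
    cases num_list with
    | nil => simp
    | cons x xs => simp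
  · have hb : (dest == 0) = false := by simpa using hd
    rw [loop_ne_zero dest hd, hb]
    simp only [Bool.false_eq_true, if_false, digitsAcc_eq, List.nil_append]
    calc num_list.any (fun num => hasNumInner num dest)
        = num_list.any (fun num => (dlist dest).contains num) := by
          simp only [inner_eq_contains]
      _ = (dlist dest).any (fun d => num_list.contains d) := any_comm _ _
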